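-- pv_equiv track=rewrite | github.com/dev1ender/learn | script.py | solution
-- ===== SOURCE A (Python) =====
-- def solution(S):
--     # write your code in Python 3.6
--     result = ''
--     counter = 1
--     S = S.replace(' ','')
--     S = S.replace('-','')
--     for index,ch in enumerate(S):
--         if(counter == 3 and len(S)- index > 3 ):
--             counter = 1
--             result += ch+'-'
--         elif(len(S) - index == 4):
--             result += S[-4:-2]+'-'+S[-2:]
--             break
--         else:
--             result += ch
--             counter += 1
--     return result
-- ===== SOURCE B (Python) =====
-- def solution(S):
--     S = S.replace(' ', '').replace('-', '')
--     groups = []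
--     while len(S) > 4:
--         groups.append(S[:3])
--         S = S[3:]
--     if len(S) == 4:
--         groups.append(S[:2])
--         groups.append(S[2:])
--     else:
--         groups.append(S)
--     return '-'.join(groups)
-- ===== Notes on version B (the rewrite author's own statement) =====
-- stated objective: simpler
-- what changed: Replaces A's per-character enumerate loop with counter/break bookkeeping by a chunk-slicing loop that peels three-char groups while more than four chars remain, splits a four-char tail two-plus-two, and dash-joins the groups.
import Mathlib
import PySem

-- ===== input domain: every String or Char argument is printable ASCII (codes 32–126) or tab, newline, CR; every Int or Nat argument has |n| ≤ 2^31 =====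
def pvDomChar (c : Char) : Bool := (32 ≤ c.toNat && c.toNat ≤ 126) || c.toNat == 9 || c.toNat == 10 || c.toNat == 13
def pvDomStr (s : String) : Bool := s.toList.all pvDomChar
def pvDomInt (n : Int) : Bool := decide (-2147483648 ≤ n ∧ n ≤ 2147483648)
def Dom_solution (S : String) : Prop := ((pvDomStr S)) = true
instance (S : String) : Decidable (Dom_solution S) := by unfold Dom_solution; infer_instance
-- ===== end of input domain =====

-- B replaces A's per-character enumerate loop (counter + break) by a loop peeling 3-char chunks
-- with a 2+2 split of a 4-char tail, joined with '-' (objective: simpler).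

-- ===== PORT A =====
-- A's for-loop over enumerate(S) with mutable result/counter and break; `full` is the
-- (fixed) stripped string the loop reads len(S) and S[-4:-2]/S[-2:] from.
def solLoop (full : List Char) : List Char → Nat → Int → List Char → List Char
  | [], _, _, res => res
  | ch :: rest, index, counter, res =>
    if counter = 3 ∧ (full.length : Int) - (index : Int) > 3 then
      solLoop full rest (index + 1) 1 (res ++ [ch, '-'])
    else if (full.length : Int) - (index : Int) = 4 then
      -- `break` after appending S[-4:-2] + '-' + S[-2:]
      res ++ PySem.List.slice full (some (-4)) (some (-2)) ++
        '-' :: PySem.List.slice full (some (-2)) none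
    else
      solLoop full rest (index + 1) (counter + 1) (res ++ [ch])

def solution (S : String) : String :=
  let s := PySem.Str.replace (PySem.Str.replace S " " "") "-" ""
  String.ofList (solLoop s.toList s.toList 0 1 [])

-- ===== PORT B =====
-- the while-loop of Source B building the list `groups`
def solChunks (s : List Char) : List (List Char) :=
  if _h : 4 < s.length then s.take 3 :: solChunks (s.drop 3)
  else if s.length = 4 then [s.take 2, s.drop 2] else [s]
termination_by s.length
decreasing_by simp; omega

def solution_alt (S : String) : String :=
  let s := PySem.Str.replace (PySem.Str.replace S " " "") "-" ""
  String.ofList (PySem.Chars.join ['-'] (solChunks s.toList))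

-- ===== PRECONDITION & SPEC =====
def Spec_solution (S : String) (out : String) : Prop := out = solution_alt S
instance (S : String) (out : String) : Decidable (Spec_solution S out) := by unfold Spec_solution; infer_instance

-- ===== CLAIM (what is proved, stated in full; the proofs are below) =====
def Claim_equal_solution : Prop := ∀ (S : String), Dom_solution S → Spec_solution S (solution S)

-- ===== LEMMAS AND PROOFS =====

-- the accumulator is only ever appended to
lemma solLoop_acc (full : List Char) : ∀ (rest : List Char) (i : Nat) (c : Int) (res : List Char),
    solLoop full rest i c res = res ++ solLoop full rest i c [] := by
  intro rest
  induction rest with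
  | nil => intro i c res; simp [solLoop]
  | cons ch t ih =>
    intro i c res
    rw [solLoop, solLoop]
    simp only [List.nil_append]
    split_ifs with h1 h2
    · rw [ih _ _ (res ++ [ch, '-']), ih _ _ ([ch, '-'])]; simp
    · simp
    · rw [ih _ _ (res ++ [ch]), ih _ _ [ch]]; simp

-- s[-4:-2] on a string of length ≥ 4
lemma slice_neg42 (xs : List Char) (h : 4 ≤ xs.length) :
    PySem.List.slice xs (some (-4)) (some (-2)) = (xs.drop (xs.length - 4)).take 2 := by
  rw [show ((-4 : Int)) = -((4 : Nat) : Int) by norm_num,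
      show ((-2 : Int)) = -((2 : Nat) : Int) by norm_num]
  simp [PySem.List.slice]
  omega

lemma slice_neg2 (xs : List Char) :
    PySem.List.slice xs (some (-2)) none = xs.drop (xs.length - 2) := by
  rw [show ((-2 : Int)) = -((2 : Nat) : Int) by norm_num]
  exact PySem.List.slice_from_neg_natCast xs 2 (by omega)

-- dropping a prefix of `full` the loop has already passed does not change the rest of the run
lemma solLoop_shift (full : List Char) (d : Nat) (hd : d ≤ full.length) :
    ∀ (rest : List Char) (i : Nat) (c : Int), d ≤ i →
    solLoop full rest i c [] = solLoop (full.drop d) rest (i - d) c [] := by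
  intro rest
  induction rest with
  | nil => intro i c _; simp [solLoop]
  | cons ch t ih =>
    intro i c hi
    rw [solLoop, solLoop]
    have hlen : ((full.drop d).length : Int) - ((i - d : Nat) : Int)
        = (full.length : Int) - (i : Int) ∨ (full.length : Int) < (i : Int) := by
      by_cases h : i ≤ full.length
      · left; simp [List.length_drop]; omega
      · right; omega
    have hcond : ((full.drop d).length : Int) - ((i - d : Nat) : Int)
        = (full.length : Int) - (i : Int) ∨
        ((full.length : Int) - (i : Int) < 0 ∧ ((full.drop d).length : Int) - ((i - d : Nat) : Int) < 0) := by
      rcases hlen with h | h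
      · exact Or.inl h
      · right; constructor <;> [omega; skip]
        simp [List.length_drop]; omega
    rcases hcond with heq | ⟨hneg1, hneg2⟩
    · rw [heq]
      split_ifs with h1 h2
      · rw [solLoop_acc, solLoop_acc (full.drop d)]
        rw [ih (i + 1) 1 (by omega)]
        congr 2
        omega
      · -- break branch: full.length - i = 4, so the last 4 chars agree
        have h4 : full.length = i + 4 := by omega
        have hlen4 : 4 ≤ full.length := by omega
        have hlen4' : 4 ≤ (full.drop d).length := by simp [List.length_drop]; omega
        rw [slice_neg42 _ hlen4, slice_neg42 _ hlen4', slice_neg2, slice_neg2]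
        rw [List.drop_drop, List.drop_drop]
        congr 3 <;> simp [List.length_drop] <;> omega
      · rw [solLoop_acc, solLoop_acc (full.drop d)]
        rw [ih (i + 1) (c + 1) (by omega)]
        congr 2
        omega
    · -- index already past the end: both take the else branch every time
      rw [if_neg (by omega), if_neg (by omega), if_neg (by omega), if_neg (by omega)]
      rw [solLoop_acc, solLoop_acc (full.drop d)]
      rw [ih (i + 1) (c + 1) (by omega)]
      congr 2
      omega

-- one round of A's loop on a string of length ≥ 6 emits the first three chars and a dash
lemma solLoop_big (a b c : Char) (rest : List Char) (h : 3 ≤ rest.length) :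
    solLoop (a :: b :: c :: rest) (a :: b :: c :: rest) 0 1 [] =
      a :: b :: c :: '-' :: solLoop rest rest 0 1 [] := by
  have hlen : ((a :: b :: c :: rest).length : Int) = (rest.length : Int) + 3 := by
    simp; omega
  rw [solLoop]
  rw [if_neg (by simp), if_neg (by rw [hlen]; omega)]
  rw [solLoop]
  rw [if_neg (by simp), if_neg (by rw [hlen]; push_cast; omega)]
  rw [solLoop]
  rw [if_pos (by refine ⟨rfl, ?_⟩; rw [hlen]; push_cast; omega)]
  rw [solLoop_acc]
  have hshift := solLoop_shift (a :: b :: c :: rest) 3 (by simp) rest 3 1 (by omega)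
  simp only [List.drop_succ_cons, List.drop_zero] at hshift
  rw [hshift]
  simp

lemma join_cons (g g2 : List Char) (gs : List (List Char)) :
    PySem.Chars.join ['-'] (g :: g2 :: gs) = g ++ '-' :: PySem.Chars.join ['-'] (g2 :: gs) := by
  simp [PySem.Chars.join, List.intercalate]

lemma solChunks_ne_nil (s : List Char) : solChunks s ≠ [] := by
  rw [solChunks]
  split_ifs <;> simp

-- the main equivalence on the stripped character list
lemma solLoop_eq_chunks : ∀ (cs : List Char),
    solLoop cs cs 0 1 [] = PySem.Chars.join ['-'] (solChunks cs) := by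
  intro cs
  induction cs using solChunks.induct with
  | case1 s h ih =>
    -- 4 < s.length
    match s, h with
    | a :: b :: c :: d :: e :: rest, h =>
      match rest, h with
      | [], _ =>
        -- length exactly 5
        rw [solChunks]
        simp only [List.length_cons, List.length_nil]
        rw [dif_pos (by omega)]
        simp only [List.take_succ_cons, List.take_zero, List.drop_succ_cons, List.drop_zero]
        rw [solChunks]
        norm_num
        rw [join_cons]
        rw [solLoop]
        rw [if_neg (by simp), if_neg (by simp)]
        rw [solLoop]
        rw [if_neg (by simp), if_pos (by simp)]
        rw [slice_neg42 _ (by simp), slice_neg2]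
        simp [PySem.Chars.join, List.intercalate]
      | r0 :: rest', _ =>
        have hr : 3 ≤ (d :: e :: r0 :: rest').length := by simp
        rw [solLoop_big a b c _ hr]
        rw [solChunks, dif_pos (show 4 < (a :: b :: c :: d :: e :: r0 :: rest').length by simp)]
        simp only [List.take_succ_cons, List.take_zero, List.drop_succ_cons, List.drop_zero]
        simp only [List.drop_succ_cons, List.drop_zero] at ih
        rw [ih]
        obtain ⟨g2, gs, hg⟩ : ∃ g2 gs, solChunks (d :: e :: r0 :: rest') = g2 :: gs := by
          rcases hx : solChunks (d :: e :: r0 :: rest') with _ | ⟨g2, gs⟩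
          · exact absurd hx (solChunks_ne_nil _)
          · exact ⟨g2, gs, rfl⟩
        rw [hg, join_cons]
        simp
  | case2 s h h4 =>
    -- length = 4
    match s, h4 with
    | [a, b, c, d], _ =>
      rw [solChunks]
      norm_num
      rw [join_cons]
      rw [solLoop]
      rw [if_neg (by simp), if_pos (by simp)]
      rw [slice_neg42 _ (by simp), slice_neg2]
      simp [PySem.Chars.join, List.intercalate]
  | case3 s h h4 =>
    -- length ≤ 3: A copies the string, B emits one group
    rw [solChunks, dif_neg h, if_neg h4]
    have hlen : s.length ≤ 3 := by omega
    match s, hlen with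
    | [], _ => simp [solLoop, PySem.Chars.join, List.intercalate]
    | [a], _ =>
      rw [solLoop]
      rw [if_neg (by simp), if_neg (by simp)]
      simp [solLoop, PySem.Chars.join, List.intercalate]
    | [a, b], _ =>
      rw [solLoop]
      rw [if_neg (by simp), if_neg (by simp)]
      rw [solLoop]
      rw [if_neg (by simp), if_neg (by simp)]
      simp [solLoop, PySem.Chars.join, List.intercalate]
    | [a, b, c], _ =>
      rw [solLoop]
      rw [if_neg (by simp), if_neg (by simp)]
      rw [solLoop]
      rw [if_neg (by simp), if_neg (by simp)]
      rw [solLoop]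
      rw [if_neg (by simp), if_neg (by simp)]
      simp [solLoop, PySem.Chars.join, List.intercalate]

-- ===== VERDICT (by name: the statement is the Claim_ definition above) =====
theorem solution_spec : Claim_equal_solution := by
  intro S _
  unfold Spec_solution
  simp only [solution, solution_alt, solLoop_eq_chunks]
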